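-- pv_equiv track=rewrite | github.com/loickengit/O_NJU_JK | 最小化初始点.py | solve
-- ===== SOURCE A (Python) =====
-- def solve(grid):
--     m, n = len(grid), len(grid[0])
--     dp = [[float('inf')]*(n+1) for _ in range(m+1)]
--     dp[m-1][n-1] = max(-grid[-1][-1], 0) + 1
--
--     for i in range(m)[::-1]:
--         for j in range(n)[::-1]:
--             if i == m-1 and j == n-1:
--                 continue
--             best_exit = min(dp[i+1][j], dp[i][j+1])
--             dp[i][j] = max(best_exit-grid[i][j], 1)
--     return dp[0][0]
-- ===== SOURCE B (Python) =====
-- from functools import lru_cache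
--
-- def solve(grid):
--     m, n = len(grid), len(grid[0])
--     INF = float('inf')
--
--     @lru_cache(maxsize=None)
--     def need(i, j):
--         if i >= m or j >= n:
--             return INF
--         if i == m - 1 and j == n - 1:
--             return max(1, 1 - grid[i][j])
--         return max(1, min(need(i + 1, j), need(i, j + 1)) - grid[i][j])
--
--     return need(0, 0)
-- ===== Notes on version B (the rewrite author's own statement) =====
-- stated objective: alternative
-- what changed: Replaces A's bottom-up DP over an (m+1)x(n+1) table filled by reversed nested loops with a top-down memoized recursion need(i,j) on cell coordinates (out-of-range = +inf, bottom-right as base case), returning need(0,0).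
-- outside the precondition, e.g. on solve([[0], [-5, 3]]): A returns 1, B returns 6; on solve([[1, 2], [3]]): A returns 1, B raises IndexError
import Mathlib
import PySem

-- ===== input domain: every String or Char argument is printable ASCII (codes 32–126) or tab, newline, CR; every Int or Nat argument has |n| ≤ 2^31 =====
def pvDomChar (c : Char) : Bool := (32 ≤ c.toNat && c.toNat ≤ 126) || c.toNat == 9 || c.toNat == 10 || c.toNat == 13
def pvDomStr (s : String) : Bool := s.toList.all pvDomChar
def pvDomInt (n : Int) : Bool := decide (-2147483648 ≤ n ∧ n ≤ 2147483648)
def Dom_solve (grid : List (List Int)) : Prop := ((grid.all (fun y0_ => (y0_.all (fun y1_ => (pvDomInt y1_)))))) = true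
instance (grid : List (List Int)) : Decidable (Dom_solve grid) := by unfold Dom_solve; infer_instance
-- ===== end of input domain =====

-- B replaces A's bottom-up DP table with a top-down memoized recursion on cell coordinates (alternative decomposition, same cost).


-- shared primitive helpers: grid element access (exact under Pre_, where every index is in range)
def pvAt (grid : List (List Int)) (i j : Nat) : Int := (grid.getD i []).getD j 0

-- Python's min with float('inf') represented as none
def ominf : Option Int → Option Int → Option Int
  | none, b => b
  | some x, none => some x
  | some x, some y => some (min x y)

-- ===== PORT A =====
-- A-side helpers: the dp table as a function Nat → Nat → Option Int (none = float('inf'))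
def dpInit (grid : List (List Int)) (m n : Nat) : Nat → Nat → Option Int :=
  fun i j => if i = m - 1 ∧ j = n - 1
             then some (max (-((grid.getLastD []).getLastD 0)) 0 + 1)   -- dp[m-1][n-1] = max(-grid[-1][-1], 0) + 1
             else none

-- body of the inner loop over j
def dpCell (grid : List (List Int)) (m n i : Nat) (dp : Nat → Nat → Option Int) (j : Nat) :
    Nat → Nat → Option Int :=
  if i = m - 1 ∧ j = n - 1 then dp   -- continue
  else
    let best := ominf (dp (i + 1) j) (dp i (j + 1))
    fun i' j' => if i' = i ∧ j' = j then best.map (fun v => max (v - pvAt grid i j) 1) else dp i' j'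

-- body of the outer loop over i
def dpRow (grid : List (List Int)) (m n : Nat) (dp : Nat → Nat → Option Int) (i : Nat) :
    Nat → Nat → Option Int :=
  (List.range n).reverse.foldl (dpCell grid m n i) dp

def solve (grid : List (List Int)) : Int :=
  let m := grid.length
  let n := (grid.headD []).length
  let dp := (List.range m).reverse.foldl (dpRow grid m n) (dpInit grid m n)
  (dp 0 0).getD 0

-- ===== PORT B =====
-- B-side helper: need i j = minimum health needed to enter cell (i,j); none = float('inf') (out of range)
def needO (grid : List (List Int)) (m n i j : Nat) : Option Int :=
  if _h : m ≤ i ∨ n ≤ j then none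
  else if i = m - 1 ∧ j = n - 1 then some (max 1 (1 - pvAt grid i j))
  else (ominf (needO grid m n (i + 1) j) (needO grid m n i (j + 1))).map
         (fun v => max 1 (v - pvAt grid i j))
termination_by (m - i) + (n - j)
decreasing_by all_goals omega

def solve_alt (grid : List (List Int)) : Int :=
  let m := grid.length
  let n := (grid.headD []).length
  (needO grid m n 0 0).getD 0

-- ===== PRECONDITION & SPEC =====
-- Pre_ restricts to the task's natural domain: a nonempty rectangular grid with at least one
-- column. Outside it A raises IndexError (empty grid / empty first row / a too-short row) or, on
-- ragged grids where every accessed index happens to exist, A reads grid[-1][-1] from beyond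
-- column n-1 of the last row, an accident of its indexing.
def Pre_solve (grid : List (List Int)) : Prop :=
  grid ≠ [] ∧ 0 < (grid.headD []).length ∧ ∀ row ∈ grid, row.length = (grid.headD []).length
instance (grid : List (List Int)) : Decidable (Pre_solve grid) := by unfold Pre_solve; infer_instance
def pvWitness_solve : List (List Int) := [[-2, -3, 3], [-5, -10, 1], [10, 30, -5]]

def Spec_solve (grid : List (List Int)) (out : Int) : Prop := out = solve_alt grid
instance (grid : List (List Int)) (out : Int) : Decidable (Spec_solve grid out) := by unfold Spec_solve; infer_instance

-- ===== CLAIM (what is proved, stated in full; the proofs are below) =====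
def Claim_equal_solve : Prop := ∀ (grid : List (List Int)), Dom_solve grid → Pre_solve grid → Spec_solve grid (solve grid)

-- ===== LEMMAS AND PROOFS =====

-- out-of-range cells need infinite (= none) health bookkeeping
theorem needO_oob (grid : List (List Int)) (m n i j : Nat) (h : m ≤ i ∨ n ≤ j) :
    needO grid m n i j = none := by
  rw [needO, dif_pos h]

theorem getLastD_eq_getD (l : List Int) (d : Int) : l.getLastD d = l.getD (l.length - 1) d := by
  rw [List.getLastD_eq_getLast?, List.getLast?_eq_getElem?, List.getD_eq_getElem?_getD]

theorem getLastD_eq_getD' (l : List (List Int)) (d : List Int) :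
    l.getLastD d = l.getD (l.length - 1) d := by
  rw [List.getLastD_eq_getLast?, List.getLast?_eq_getElem?, List.getD_eq_getElem?_getD]

-- under Pre_, grid[-1][-1] is exactly the bottom-right cell
theorem lastlast_eq (grid : List (List Int)) (hPre : Pre_solve grid) :
    (grid.getLastD []).getLastD 0 = pvAt grid (grid.length - 1) ((grid.headD []).length - 1) := by
  obtain ⟨hne, hn, hrect⟩ := hPre
  have hm : 0 < grid.length := List.length_pos_iff.mpr hne
  have hrow : grid.getD (grid.length - 1) [] = grid[grid.length - 1] := by
    rw [List.getD_eq_getElem?_getD, List.getElem?_eq_getElem (by omega)]; rfl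
  have hlen : (grid.getD (grid.length - 1) []).length = (grid.headD []).length := by
    rw [hrow]; exact hrect _ (List.getElem_mem _)
  rw [getLastD_eq_getD' grid [], getLastD_eq_getD, hlen]; rfl

-- the dp seed for the bottom-right cell equals need(m-1, n-1)
theorem base_eq (grid : List (List Int)) (hPre : Pre_solve grid) :
    dpInit grid grid.length (grid.headD []).length (grid.length - 1) ((grid.headD []).length - 1)
      = needO grid grid.length (grid.headD []).length (grid.length - 1) ((grid.headD []).length - 1) := by
  have hm : 0 < grid.length := List.length_pos_iff.mpr hPre.1
  have hn : 0 < (grid.headD []).length := hPre.2.1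
  rw [dpInit, if_pos ⟨rfl, rfl⟩, needO, dif_neg (by omega), if_pos ⟨rfl, rfl⟩,
    lastlast_eq grid hPre]
  congr 1
  omega

-- loop invariants: rows ≥ i₀ are finished (hold need values), the rest still hold the seed
def InvRow (grid : List (List Int)) (m n i₀ : Nat) (dp : Nat → Nat → Option Int) : Prop :=
  ∀ i' j', dp i' j' = if i₀ ≤ i' then needO grid m n i' j' else dpInit grid m n i' j'

-- within row i: rows > i finished, cells (i, j') with j' ≥ j₀ finished
def InvCell (grid : List (List Int)) (m n i j₀ : Nat) (dp : Nat → Nat → Option Int) : Prop :=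
  ∀ i' j', dp i' j' = if i + 1 ≤ i' ∨ (i' = i ∧ j₀ ≤ j') then needO grid m n i' j'
                      else dpInit grid m n i' j'

theorem cellStep (grid : List (List Int)) (m n i j : Nat)
    (hi : i < m) (hj : j < n)
    (hbase : dpInit grid m n (m - 1) (n - 1) = needO grid m n (m - 1) (n - 1))
    (dp : Nat → Nat → Option Int) (H : InvCell grid m n i (j + 1) dp) :
    InvCell grid m n i j (dpCell grid m n i dp j) := by
  intro i' j'
  unfold dpCell
  by_cases hsk : i = m - 1 ∧ j = n - 1
  · rw [if_pos hsk, H i' j']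
    split_ifs with h1 h2 h2
    · rfl
    · omega
    · -- not yet written by the (j+1)-invariant, but inside the j-invariant: it is the base cell
      have hij : i' = m - 1 ∧ j' = n - 1 := by omega
      rw [hij.1, hij.2]; exact hbase
    · rfl
  · rw [if_neg hsk]
    show (if i' = i ∧ j' = j
          then (ominf (dp (i + 1) j) (dp i (j + 1))).map (fun v => max (v - pvAt grid i j) 1)
          else dp i' j') = _
    by_cases hcur : i' = i ∧ j' = j
    · rw [if_pos hcur, hcur.1, hcur.2, if_pos (Or.inr ⟨rfl, le_rfl⟩)]
      have d1 : dp (i + 1) j = needO grid m n (i + 1) j := by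
        rw [H (i + 1) j, if_pos (Or.inl le_rfl)]
      have d2 : dp i (j + 1) = needO grid m n i (j + 1) := by
        rw [H i (j + 1), if_pos (Or.inr ⟨rfl, le_rfl⟩)]
      rw [d1, d2]
      conv_rhs => rw [needO]
      rw [dif_neg (by omega : ¬(m ≤ i ∨ n ≤ j)), if_neg hsk]
      cases ominf (needO grid m n (i + 1) j) (needO grid m n i (j + 1)) with
      | none => rfl
      | some v => simp only [Option.map_some]; rw [max_comm]
    · rw [if_neg hcur, H i' j']
      split_ifs with h1 h2 h2 <;> first | rfl | omega
      
theorem cellsFold (grid : List (List Int)) (m n i : Nat)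
    (hi : i < m)
    (hbase : dpInit grid m n (m - 1) (n - 1) = needO grid m n (m - 1) (n - 1)) :
    ∀ k, k ≤ n → ∀ dp, InvCell grid m n i k dp →
      InvCell grid m n i 0 ((List.range k).reverse.foldl (dpCell grid m n i) dp) := by
  intro k
  induction k with
  | zero => intro _ dp H; simpa using H
  | succ k ih =>
    intro hk dp H
    rw [List.range_succ, List.reverse_append]
    simp only [List.reverse_singleton, List.singleton_append, List.foldl_cons]
    exact ih (by omega) _ (cellStep grid m n i k hi (by omega) hbase dp H)

theorem rowStep (grid : List (List Int)) (m n i : Nat) (hm : 0 < m) (hn : 0 < n)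
    (hi : i < m)
    (hbase : dpInit grid m n (m - 1) (n - 1) = needO grid m n (m - 1) (n - 1))
    (dp : Nat → Nat → Option Int) (H : InvRow grid m n (i + 1) dp) :
    InvRow grid m n i (dpRow grid m n dp i) := by
  have h0 : InvCell grid m n i n dp := by
    intro i' j'
    rw [H i' j']
    split_ifs with h1 h2 h2
    · rfl
    · omega
    · -- i' = i, n ≤ j': both sides are none
      have hij : i' = i ∧ n ≤ j' := by omega
      rw [dpInit, if_neg (by omega), needO_oob grid m n i' j' (Or.inr hij.2)]
    · rfl
  have h1 := cellsFold grid m n i hi hbase n le_rfl dp h0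
  intro i' j'
  rw [dpRow, h1 i' j']
  split_ifs with h1 h2 h2 <;> first | rfl | omega

theorem rowsFold (grid : List (List Int)) (m n : Nat) (hm : 0 < m) (hn : 0 < n)
    (hbase : dpInit grid m n (m - 1) (n - 1) = needO grid m n (m - 1) (n - 1)) :
    ∀ k, k ≤ m → ∀ dp, InvRow grid m n k dp →
      InvRow grid m n 0 ((List.range k).reverse.foldl (dpRow grid m n) dp) := by
  intro k
  induction k with
  | zero => intro _ dp H; simpa using H
  | succ k ih =>
    intro hk dp H
    rw [List.range_succ, List.reverse_append]
    simp only [List.reverse_singleton, List.singleton_append, List.foldl_cons]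
    exact ih (by omega) _ (rowStep grid m n k hm hn (by omega) hbase dp H)

theorem initInv (grid : List (List Int)) (m n : Nat) (hm : 0 < m) :
    InvRow grid m n m (dpInit grid m n) := by
  intro i' j'
  split_ifs with h1
  · rw [dpInit, if_neg (by omega), needO_oob grid m n i' j' (Or.inl h1)]
  · rfl

-- ===== VERDICT (by name: the statement is the Claim_ definition above) =====
theorem solve_spec : Claim_equal_solve := by
  unfold Claim_equal_solve Spec_solve
  intro grid _ hPre
  have hm : 0 < grid.length := List.length_pos_iff.mpr hPre.1
  have hn : 0 < (grid.headD []).length := hPre.2.1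
  have hbase := base_eq grid hPre
  have hfin := rowsFold grid grid.length (grid.headD []).length hm hn hbase grid.length le_rfl
    (dpInit grid grid.length (grid.headD []).length)
    (initInv grid grid.length (grid.headD []).length hm)
  have h00 := hfin 0 0
  rw [if_pos (Nat.le_refl 0)] at h00
  show ((List.range grid.length).reverse.foldl
        (dpRow grid grid.length (grid.headD []).length)
        (dpInit grid grid.length (grid.headD []).length) 0 0).getD 0
      = (needO grid grid.length (grid.headD []).length 0 0).getD 0
  rw [h00]
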